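-- pv_equiv track=rewrite | github.com/gaeul-3041/2024-coding-test | 프로그래머스/덧칠하기.py | solution
-- ===== SOURCE A (Python) =====
-- def solution(n, m, section):
--     answer = 1
--     start = section[0]
--     end = section[0] + m
--
--     for i in section:
--         if start <= i < end:
--             continue
--         else:
--             answer += 1
--             start = i  # 구간 밖 첫 블럭이 다음 구간 시작점
--             end = start + m
--
--     return answer
-- ===== SOURCE B (Python) =====
-- def solution(n, m, section):
--     # divide and conquer: each half yields (new-stroke count, start of last stroke)
--     def f(lst, start):
--         if len(lst) == 1:
--             i = lst[0]
--             if start <= i < start + m: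
--                 return (0, start)
--             return (1, i)
--         mid = len(lst) // 2
--         c1, s1 = f(lst[:mid], start)
--         c2, s2 = f(lst[mid:], s1)
--         return (c1 + c2, s2)
--     c, _ = f(section, section[0])
--     return 1 + c
-- ===== Notes on version B (the rewrite author's own statement) =====
-- stated objective: alternative
-- what changed: B replaces A's single left-to-right loop with three mutable variables (answer, start, end) by a divide-and-conquer recursion that splits the section list in half and combines (new-stroke count, last-stroke start) pairs, threading the left half's final start into the right half.
-- outside the precondition, e.g. on solution(4, 1, []): A raises IndexError, B raises IndexError
import Mathlib
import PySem

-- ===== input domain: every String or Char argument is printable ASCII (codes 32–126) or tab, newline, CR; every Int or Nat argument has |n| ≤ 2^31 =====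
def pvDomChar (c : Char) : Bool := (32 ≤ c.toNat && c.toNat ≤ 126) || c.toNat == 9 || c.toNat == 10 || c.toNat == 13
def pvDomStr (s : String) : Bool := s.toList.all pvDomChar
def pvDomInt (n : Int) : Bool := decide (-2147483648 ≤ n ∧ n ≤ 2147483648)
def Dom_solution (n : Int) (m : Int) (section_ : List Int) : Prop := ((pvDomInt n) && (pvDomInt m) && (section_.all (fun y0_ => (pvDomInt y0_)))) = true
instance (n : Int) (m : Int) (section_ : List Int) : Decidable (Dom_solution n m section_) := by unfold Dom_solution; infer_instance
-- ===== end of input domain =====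

-- B replaces A's single mutable-state loop by a divide-and-conquer recursion combining
-- (stroke-count, last-stroke-start) pairs of the two halves (objective: alternative, not faster).

-- ===== PORT A =====
-- loop body of A: state is (answer, start, end)
def stepA (m : Int) (acc : Int × Int × Int) (i : Int) : Int × Int × Int :=
  if acc.2.1 ≤ i ∧ i < acc.2.2 then acc else (acc.1 + 1, i, i + m)

def solution (n : Int) (m : Int) (section_ : List Int) : Int :=
  match section_ with
  | [] => 0   -- Python A raises IndexError on section[0]; excluded by Pre_solution
  | s0 :: _ => (section_.foldl (stepA m) (1, s0, s0 + m)).1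

-- ===== PORT B =====
-- B's helper f: returns (number of new strokes in lst, start of the last stroke)
def fGo (m : Int) (lst : List Int) (start : Int) : Int × Int :=
  if _h : lst.length ≤ 1 then
    match lst with
    | [] => (0, start)   -- B never calls f on []; arm for totality only
    | i :: _ => if start ≤ i ∧ i < start + m then (0, start) else (1, i)
  else
    let mid := lst.length / 2
    let p1 := fGo m (lst.take mid) start
    let p2 := fGo m (lst.drop mid) p1.2
    (p1.1 + p2.1, p2.2)
termination_by lst.length
decreasing_by
  · simp only [List.length_take]; omega
  · simp only [List.length_drop]; omega

def solution_alt (n : Int) (m : Int) (section_ : List Int) : Int :=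
  match section_ with
  | [] => 0   -- Python B raises IndexError on section[0]; excluded by Pre_solution
  | s0 :: _ => 1 + (fGo m section_ s0).1

-- ===== PRECONDITION & SPEC =====
-- Pre_ excludes only the empty section list, on which both Pythons raise IndexError at section[0].
def Pre_solution (n : Int) (m : Int) (section_ : List Int) : Prop := section_ ≠ []
instance (n : Int) (m : Int) (section_ : List Int) : Decidable (Pre_solution n m section_) := by unfold Pre_solution; infer_instance

def pvWitness_solution : Int × Int × List Int := (8, 4, [2, 3, 6])

def Spec_solution (n : Int) (m : Int) (section_ : List Int) (out : Int) : Prop := out = solution_alt n m section_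
instance (n : Int) (m : Int) (section_ : List Int) (out : Int) : Decidable (Spec_solution n m section_ out) := by unfold Spec_solution; infer_instance

-- ===== CLAIM (what is proved, stated in full; the proofs are below) =====
def Claim_equal_solution : Prop := ∀ (n : Int) (m : Int) (section_ : List Int), Dom_solution n m section_ → Pre_solution n m section_ → Spec_solution n m section_ (solution n m section_)

-- ===== LEMMAS AND PROOFS =====

-- the "pure" step: state (count, start), with end recomputed as start + m
def step2 (m : Int) (acc : Int × Int) (i : Int) : Int × Int :=
  if acc.2 ≤ i ∧ i < acc.2 + m then acc else (acc.1 + 1, i)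

-- count offset lemma for the pure fold
theorem foldl_step2_shift (m : Int) (ys : List Int) (p : Int × Int) :
    ys.foldl (step2 m) p
      = ((ys.foldl (step2 m) (0, p.2)).1 + p.1, (ys.foldl (step2 m) (0, p.2)).2) := by
  induction ys generalizing p with
  | nil => simp
  | cons i rest ih =>
    simp only [List.foldl_cons, step2]
    split
    · exact ih p
    · rw [ih (p.1 + 1, i), ih (0 + 1, i)]
      rw [Prod.mk.injEq]
      exact ⟨by ring, rfl⟩

-- B's divide and conquer computes the pure fold
theorem fGo_eq_foldl (m : Int) (lst : List Int) (s : Int) :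
    fGo m lst s = lst.foldl (step2 m) (0, s) := by
  fun_induction fGo m lst s with
  | case1 => simp
  | case2 s i tail h1 hc h2 =>
    cases tail with
    | nil => simp [step2, hc]
    | cons j r => simp at h2
  | case3 s i tail h1 hc h2 =>
    cases tail with
    | nil => simp [step2, hc]
    | cons j r => simp at h2
  | case4 lst s h mid p1 p2 ih3 ih2 ih1 =>
    have hp1 : p1 = List.foldl (step2 m) (0, s) (List.take mid lst) := ih3
    have hp2 : p2 = List.foldl (step2 m) (0, p1.2) (List.drop mid lst) := ih1
    conv_rhs => rw [← List.take_append_drop mid lst]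
    rw [List.foldl_append, ← hp1, foldl_step2_shift m _ p1, ← hp2]
    rw [Prod.mk.injEq]
    exact ⟨by ring, rfl⟩

-- A's 3-component fold equals the pure fold (end = start + m is A's loop invariant)
theorem foldlA_eq (m : Int) (lst : List Int) (a s : Int) :
    lst.foldl (stepA m) (a, s, s + m)
      = ((lst.foldl (step2 m) (0, s)).1 + a,
         (lst.foldl (step2 m) (0, s)).2,
         (lst.foldl (step2 m) (0, s)).2 + m) := by
  induction lst generalizing a s with
  | nil => simp
  | cons i rest ih =>
    simp only [List.foldl_cons, stepA, step2]
    split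
    · exact ih a s
    · rw [ih (a + 1) i, foldl_step2_shift m rest ((0 : Int) + 1, i)]
      rw [Prod.mk.injEq, Prod.mk.injEq]
      exact ⟨by ring, rfl, rfl⟩

-- ===== VERDICT (by name: the statement is the Claim_ definition above) =====
theorem solution_spec : Claim_equal_solution := by
  intro n m section_ _hDom hPre
  unfold Spec_solution solution solution_alt
  match section_, hPre with
  | s0 :: rest, _ =>
    simp only
    rw [foldlA_eq, fGo_eq_foldl]
    simp; ring
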